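-- pv_equiv track=rewrite | github.com/victinyGitHub/mole | mole/context.py | _detect_indent
-- ===== SOURCE A (Python) =====
-- def _detect_indent(source: str) -> str:
--     """Detect indentation style from source code."""
--     tab_count = 0
--     space_count = 0
--     for line in source.splitlines():
--         if line.startswith("\t"):
--             tab_count += 1
--         elif line.startswith("  "):
--             space_count += 1
--
--     if tab_count > space_count:
--         return "tabs"
--     # Try to detect spaces per level
--     space_sizes: dict[int, int] = {}
--     for line in source.splitlines():
--         stripped = line.lstrip(" ")
--         indent_len = len(line) - len(stripped)
--         if indent_len > 0:
--             space_sizes[indent_len] = space_sizes.get(indent_len, 0) + 1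
--     if space_sizes:
--         # Most common indent level
--         common = min(space_sizes.keys())
--         return f"{common} spaces"
--     return "4 spaces"  # Default
-- ===== SOURCE B (Python) =====
-- def _detect_indent(source: str) -> str:
--     """Detect indentation style from source code (single pass, no dict)."""
--     tab_count = 0
--     space_count = 0
--     min_indent = None  # smallest positive leading-space count seen so far
--     for line in source.splitlines():
--         if line.startswith("\t"):
--             tab_count += 1
--         elif line.startswith("  "):
--             space_count += 1
--         n = len(line) - len(line.lstrip(" "))
--         if n > 0 and (min_indent is None or n < min_indent):
--             min_indent = n
--     if tab_count > space_count:
--         return "tabs"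
--     if min_indent is not None:
--         return f"{min_indent} spaces"
--     return "4 spaces"
-- ===== Notes on version B (the rewrite author's own statement) =====
-- stated objective: simpler
-- what changed: Replaces A's frequency dict (of which only the minimum key was ever used) with a scalar running minimum, and fuses A's two passes over the lines into one loop with three scalar accumulators.
import Mathlib
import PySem

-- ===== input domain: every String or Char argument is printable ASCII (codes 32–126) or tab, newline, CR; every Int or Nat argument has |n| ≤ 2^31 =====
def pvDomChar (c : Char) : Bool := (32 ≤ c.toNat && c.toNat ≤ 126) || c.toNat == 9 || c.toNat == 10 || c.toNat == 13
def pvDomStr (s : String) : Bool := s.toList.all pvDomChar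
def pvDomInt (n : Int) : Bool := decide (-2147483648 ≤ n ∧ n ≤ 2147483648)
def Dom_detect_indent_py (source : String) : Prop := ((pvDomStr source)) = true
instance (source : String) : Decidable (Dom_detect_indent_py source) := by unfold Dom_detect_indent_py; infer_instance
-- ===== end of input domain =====

-- B replaces A's frequency dict (only its minimum key was used) by a scalar running
-- minimum and fuses A's two passes over the lines into one loop; objective: simpler.

-- ===== PORT A =====

-- len(line) - len(line.lstrip(" ")): exact — lstrip(" ") drops leading ' ' chars
def pvIndentLen (line : String) : Int :=
  (line.toList.length : Int) - ((line.toList.dropWhile (fun c => c == ' ')).length : Int)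

-- the body of A's first loop (tab_count, space_count)
def pvCountStep (p : Int × Int) (line : String) : Int × Int :=
  if PySem.Str.startswith line "\t" then (p.1 + 1, p.2)
  else if PySem.Str.startswith line "  " then (p.1, p.2 + 1)
  else p

-- the body of A's second loop (space_sizes dict)
def pvDictStep (d : PySem.Dict Int Int) (line : String) : PySem.Dict Int Int :=
  let indent_len := pvIndentLen line
  if 0 < indent_len then d.insert indent_len (d.getD indent_len 0 + 1) else d

def detect_indent_py (source : String) : String :=
  let counts := (PySem.Str.splitlines source).foldl pvCountStep (0, 0)
  if counts.2 < counts.1 then "tabs"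
  else
    let space_sizes := (PySem.Str.splitlines source).foldl pvDictStep PySem.Dict.empty
    if space_sizes.items ≠ [] then
      match PySem.List.min? space_sizes.keys (fun x => x) with
      | some common => PySem.Int.toStr common ++ " spaces"
      | none => "4 spaces"   -- unreachable: the dict is nonempty
    else "4 spaces"

-- ===== PORT B =====

-- running minimum of the positive indents (B's min_indent variable)
def pvMinStep (m : Option Int) (line : String) : Option Int :=
  let n := pvIndentLen line
  if 0 < n ∧ (m.isNone ∨ n < m.getD 0) then some n else m

-- B's single loop body over the state ((tab_count, space_count), min_indent)
def pvAltStep (s : (Int × Int) × Option Int) (line : String) : (Int × Int) × Option Int :=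
  (pvCountStep s.1 line, pvMinStep s.2 line)

def detect_indent_py_alt (source : String) : String :=
  let st := (PySem.Str.splitlines source).foldl pvAltStep ((0, 0), none)
  if st.1.2 < st.1.1 then "tabs"
  else
    match st.2 with
    | some m => PySem.Int.toStr m ++ " spaces"
    | none => "4 spaces"

-- ===== PRECONDITION & SPEC =====
def Spec_detect_indent_py (source : String) (out : String) : Prop := out = detect_indent_py_alt source
instance (source : String) (out : String) : Decidable (Spec_detect_indent_py source out) := by unfold Spec_detect_indent_py; infer_instance

-- ===== CLAIM (what is proved, stated in full; the proofs are below) =====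
def Claim_equal_detect_indent_py : Prop := ∀ (source : String), Dom_detect_indent_py source → Spec_detect_indent_py source (detect_indent_py source)

-- ===== LEMMAS AND PROOFS =====

-- B's fused fold is the pair of A's two folds
theorem pvAlt_foldl_split (ls : List String) (c : Int × Int) (m : Option Int) :
    ls.foldl pvAltStep (c, m) = (ls.foldl pvCountStep c, ls.foldl pvMinStep m) := by
  induction ls generalizing c m with
  | nil => rfl
  | cons l t ih => simp [List.foldl, pvAltStep, ih]

-- invariant: m is the minimum of d's keys (none iff no keys)
def pvInv (d : PySem.Dict Int Int) (m : Option Int) : Prop :=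
  (d.keys = [] ↔ m = none) ∧ (∀ v, m = some v → v ∈ d.keys ∧ ∀ y ∈ d.keys, v ≤ y)

theorem pvInv_step (d : PySem.Dict Int Int) (m : Option Int) (line : String)
    (h : pvInv d m) : pvInv (pvDictStep d line) (pvMinStep m line) := by
  obtain ⟨h1, h2⟩ := h
  unfold pvDictStep pvMinStep
  by_cases hn : 0 < pvIndentLen line
  · simp only [hn, if_pos, true_and]
    set n := pvIndentLen line
    by_cases hm : m.isNone ∨ n < m.getD 0
    · -- new minimum n
      simp only [hm, if_pos]
      constructor
      · constructor
        · intro hk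
          have : n ∈ (d.insert n (d.getD n 0 + 1)).keys := by
            simp [PySem.Dict.mem_keys_insert]
          simp [hk] at this
        · intro hc; exact absurd hc (by simp)
      · intro v hv
        injection hv with hv; subst hv
        refine ⟨by simp [PySem.Dict.mem_keys_insert], ?_⟩
        intro y hy
        rw [PySem.Dict.mem_keys_insert] at hy
        rcases hy with rfl | hy
        · exact le_refl _
        · rcases hm with hm | hm
          · -- m = none, so d.keys = []
            have : m = none := by cases m <;> simp_all
            have hk0 : d.keys = [] := h1.mpr this
            rw [hk0] at hy; cases hy
          · -- n < old minimum v0 ≤ y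
            cases m with
            | none => simp at hm; omega
            | some v0 =>
              have := (h2 v0 rfl).2 y hy
              simp at hm; omega
    · -- keep old minimum
      simp only [hm, if_neg, not_false_iff]
      rw [not_or] at hm
      obtain ⟨hm1, hm2⟩ := hm
      cases m with
      | none => simp at hm1
      | some v0 =>
        constructor
        · constructor
          · intro hk
            have : v0 ∈ (d.insert n (d.getD n 0 + 1)).keys := by
              rw [PySem.Dict.mem_keys_insert]; exact Or.inr (h2 v0 rfl).1
            simp [hk] at this
          · intro hc; cases hc
        · intro v hv
          injection hv with hv; subst hv
          refine ⟨by rw [PySem.Dict.mem_keys_insert]; exact Or.inr (h2 v0 rfl).1, ?_⟩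
          intro y hy
          rw [PySem.Dict.mem_keys_insert] at hy
          rcases hy with rfl | hy
          · simp at hm2; omega
          · exact (h2 v0 rfl).2 y hy
  · simp only [hn, if_neg, not_false_iff]
    exact ⟨h1, h2⟩

theorem pvInv_foldl (ls : List String) (d : PySem.Dict Int Int) (m : Option Int)
    (h : pvInv d m) : pvInv (ls.foldl pvDictStep d) (ls.foldl pvMinStep m) := by
  induction ls generalizing d m with
  | nil => exact h
  | cons l t ih => exact ih _ _ (pvInv_step d m l h)

theorem pvMin?_id_eq (xs : List Int) (m : Int) (hm : m ∈ xs) (hmin : ∀ y ∈ xs, m ≤ y) :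
    PySem.List.min? xs (fun x => x) = some m := by
  cases h : PySem.List.min? xs (fun x => x) with
  | none =>
    rw [PySem.List.min?_eq_none_iff] at h
    rw [h] at hm; cases hm
  | some m' =>
    have hmem := PySem.List.min?_mem h
    have hle := PySem.List.min?_isMin h m hm
    have : m' = m := le_antisymm hle (hmin m' hmem)
    rw [this]

theorem detect_indent_py_eq (source : String) :
    detect_indent_py source = detect_indent_py_alt source := by
  unfold detect_indent_py detect_indent_py_alt
  rw [pvAlt_foldl_split]
  simp only []
  set ls := PySem.Str.splitlines source
  by_cases hc : (ls.foldl pvCountStep (0, 0)).2 < (ls.foldl pvCountStep (0, 0)).1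
  · simp [hc]
  · simp only [hc, if_neg, not_false_iff]
    have hinv : pvInv (ls.foldl pvDictStep PySem.Dict.empty) (ls.foldl pvMinStep none) := by
      apply pvInv_foldl
      constructor
      · simp [PySem.Dict.keys_empty]
      · intro v hv; cases hv
    set d := ls.foldl pvDictStep PySem.Dict.empty
    set m := ls.foldl pvMinStep none
    obtain ⟨h1, h2⟩ := hinv
    cases hm : m with
    | none =>
      have hk : d.keys = [] := h1.mpr hm
      have hitems : d.items = [] := by
        have : d.items.map Prod.fst = [] := hk
        exact List.map_eq_nil_iff.mp this
      simp [hitems]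
    | some v =>
      obtain ⟨hvmem, hvmin⟩ := h2 v hm
      have hitems : d.items ≠ [] := by
        intro h0
        have : d.keys = [] := by simp [PySem.Dict.keys, h0]
        rw [this] at hvmem; cases hvmem
      simp only [hitems, if_pos, ne_eq, not_false_iff]
      rw [pvMin?_id_eq d.keys v hvmem hvmin]

-- ===== VERDICT (by name: the statement is the Claim_ definition above) =====
theorem detect_indent_py_spec : Claim_equal_detect_indent_py := by
  intro source _
  unfold Spec_detect_indent_py
  exact detect_indent_py_eq source
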